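-- pv_equiv track=rewrite | github.com/UlrichBerntien/Codewars-Katas | 7_kyu/Can_you_count_loops_execution.py | count_loop_iterations
-- ===== SOURCE A (Python) =====
-- def count_loop_iterations(arr):
--     result = []
--     total_loops = 1
--     for it in arr:
--         inner_loops = it[0] + (1 if it[1] else 0)
--         result.append(total_loops * (inner_loops+1))
--         total_loops *= inner_loops
--     return result
-- ===== SOURCE B (Python) =====
-- def _solve(arr):
--     # returns (answers assuming running product 1, product of inner counts)
--     if not arr:
--         return [], 1
--     if len(arr) == 1:
--         n, b = arr[0]
--         k = n + (1 if b else 0)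
--         return [k + 1], k
--     mid = len(arr) // 2
--     left, lp = _solve(arr[:mid])
--     right, rp = _solve(arr[mid:])
--     return left + [lp * v for v in right], lp * rp
--
-- def count_loop_iterations(arr):
--     return _solve(arr)[0]
-- ===== Notes on version B (the rewrite author's own statement) =====
-- stated objective: alternative
-- what changed: Replaces A's left-to-right loop with a running-product accumulator by a divide-and-conquer: each half is solved independently assuming a starting product of 1, and the right half's answers are rescaled by the left half's product when the halves are merged.
import Mathlib
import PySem

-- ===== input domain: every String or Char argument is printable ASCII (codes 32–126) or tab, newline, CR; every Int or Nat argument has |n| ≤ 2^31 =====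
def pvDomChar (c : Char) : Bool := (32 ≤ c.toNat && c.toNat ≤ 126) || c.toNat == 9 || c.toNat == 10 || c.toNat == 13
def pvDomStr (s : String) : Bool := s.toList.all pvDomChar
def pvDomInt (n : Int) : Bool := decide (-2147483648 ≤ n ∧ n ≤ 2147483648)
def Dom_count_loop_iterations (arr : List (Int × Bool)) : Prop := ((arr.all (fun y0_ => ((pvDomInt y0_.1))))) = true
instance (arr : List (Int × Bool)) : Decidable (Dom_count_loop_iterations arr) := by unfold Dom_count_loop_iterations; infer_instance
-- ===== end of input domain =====

-- B replaces A's accumulator loop by divide-and-conquer: solve each half assuming a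
-- starting product of 1, rescale the right half's answers by the left half's product
-- (objective: alternative algorithm, same results).

-- ===== PORT A =====
-- fused loop: state = (result, total_loops)
def count_loop_iterations (arr : List (Int × Bool)) : List Int :=
  (arr.foldl (fun (st : List Int × Int) it =>
      let inner_loops := it.1 + (if it.2 then 1 else 0)
      (st.1 ++ [st.2 * (inner_loops + 1)], st.2 * inner_loops))
    ([], 1)).1

-- ===== PORT B =====
-- _solve: returns (answers assuming running product 1, product of inner counts)
def pvSolve : List (Int × Bool) → List Int × Int
  | [] => ([], 1)
  | [it] =>
    let k := it.1 + (if it.2 then 1 else 0)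
    ([k + 1], k)
  | a :: b :: rest =>
    let mid := (a :: b :: rest).length / 2
    let L := pvSolve ((a :: b :: rest).take mid)
    let R := pvSolve ((a :: b :: rest).drop mid)
    (L.1 ++ R.1.map (fun v => L.2 * v), L.2 * R.2)
  termination_by arr => arr.length
  decreasing_by
    · simp; omega
    · simp; omega

def count_loop_iterations_alt (arr : List (Int × Bool)) : List Int :=
  (pvSolve arr).1

-- ===== PRECONDITION & SPEC =====
def Spec_count_loop_iterations (arr : List (Int × Bool)) (out : List Int) : Prop := out = count_loop_iterations_alt arr
instance (arr : List (Int × Bool)) (out : List Int) : Decidable (Spec_count_loop_iterations arr out) := by unfold Spec_count_loop_iterations; infer_instance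

-- ===== CLAIM =====
def Claim_equal_count_loop_iterations : Prop := ∀ (arr : List (Int × Bool)), Dom_count_loop_iterations arr → Spec_count_loop_iterations arr (count_loop_iterations arr)

-- ===== LEMMAS AND PROOFS =====

-- common description: outputs of A starting from running product t
def pvGo (t : Int) : List Int → List Int
  | [] => []
  | x :: xs => t * (x + 1) :: pvGo (t * x) xs

def pvInner (arr : List (Int × Bool)) : List Int :=
  arr.map (fun it => it.1 + (if it.2 then 1 else 0))

theorem pvA_fold (arr : List (Int × Bool)) : ∀ (acc : List Int) (t : Int),
    (arr.foldl (fun (st : List Int × Int) it =>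
      let inner_loops := it.1 + (if it.2 then 1 else 0)
      (st.1 ++ [st.2 * (inner_loops + 1)], st.2 * inner_loops)) (acc, t)).1
    = acc ++ pvGo t (pvInner arr) := by
  induction arr with
  | nil => intro acc t; simp [pvGo, pvInner]
  | cons it rest ih =>
    intro acc t
    simp only [List.foldl_cons, pvInner, List.map_cons, pvGo]
    rw [show (rest.map (fun it => it.1 + (if it.2 then 1 else 0))) = pvInner rest from rfl]
    rw [ih]
    simp

theorem pvGo_mul (xs : List Int) : ∀ (t u : Int),
    pvGo (t * u) xs = (pvGo u xs).map (fun v => t * v) := by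
  induction xs with
  | nil => intro t u; simp [pvGo]
  | cons x xs ih =>
    intro t u
    simp only [pvGo, List.map_cons]
    congr 1
    · ring
    · rw [mul_assoc, ih]

theorem pvGo_append (xs : List Int) : ∀ (ys : List Int) (t : Int),
    pvGo t (xs ++ ys) = pvGo t xs ++ pvGo (t * xs.prod) ys := by
  induction xs with
  | nil => intro ys t; simp [pvGo]
  | cons x xs ih =>
    intro ys t
    simp only [List.cons_append, pvGo, List.prod_cons]
    rw [ih]
    ring_nf

theorem pvSolve_spec (arr : List (Int × Bool)) :
    pvSolve arr = (pvGo 1 (pvInner arr), (pvInner arr).prod) := by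
  induction arr using pvSolve.induct with
  | case1 => simp [pvSolve, pvGo, pvInner]
  | case2 it => simp [pvSolve, pvGo, pvInner]
  | case3 a b rest mid hL hR =>
    rw [pvSolve]
    simp only [] at *
    rw [hL, hR]
    have hsplit : pvInner (a :: b :: rest)
        = pvInner ((a :: b :: rest).take mid) ++ pvInner ((a :: b :: rest).drop mid) := by
      simp [pvInner]
    simp only [Prod.mk.injEq]
    refine ⟨?_, ?_⟩
    · rw [hsplit, pvGo_append]
      congr 1
      rw [show (1 : Int) * (pvInner ((a :: b :: rest).take mid)).prod
            = (pvInner ((a :: b :: rest).take mid)).prod * 1 by ring]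
      rw [pvGo_mul]
    · rw [hsplit]; simp

theorem pv_eq (arr : List (Int × Bool)) :
    count_loop_iterations arr = count_loop_iterations_alt arr := by
  unfold count_loop_iterations count_loop_iterations_alt
  rw [pvA_fold arr [] 1, pvSolve_spec]
  simp

-- ===== VERDICT =====
theorem count_loop_iterations_spec : Claim_equal_count_loop_iterations := by
  intro arr _
  exact pv_eq arr
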